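/- GENERATED by farm/mkstatement.py from design/units.tsv (unit `vorbis_decode_packet`) and the Specs of Vorbis/Spec/*.lean — do not edit.
   THE STATEMENT of the proof unit `vorbis_decode_packet`: the function `vorbis_decode_packet` (56 instructions) satisfies its contract,
   given the contracts of its callees. What the names mean: Vorbis/Spec/Basic.lean. The theorem to prove:
   `theorem vorbis_decode_packet_ok : Vorbis.Spec.vorbis_decode_packet.Statement`. -/
import Vorbis.Spec.PacketRest
import Vorbis.Spec.Top
namespace Vorbis.Spec.vorbis_decode_packet
open X86 X86.User Asan

/-- The statement of unit `vorbis_decode_packet`. -/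
def Statement : Prop :=
  ∀ (Lay : Layout) (_hLay : Lay.hi = 0x1000000) (μ : Microarch) (_hμ : UserX.MicroOK μ) (u₀ : State)
    (_hcode : HasCodeNat Lay u₀ Vorbis.L.vorbis_decode_packet.entry Vorbis.Code.code_vorbis_decode_packet.nat Vorbis.L.vorbis_decode_packet.size)
    (_h_vorbis_decode_initial : ∀ (others : List Obj) (frames : List (Nat × FrameLayout)) (len : Nat) (A : Arena) (stored room : Int) (ysz : Nat → Nat), Calls Lay μ Vorbis.WayInv (Vorbis.conv u₀) Vorbis.L.vorbis_decode_initial.entry (Vorbis.Spec.vorbis_decode_initial.spec others frames len A stored room ysz))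
    (_h_asan_load4_noabort : Asan.SmallCheck Lay μ Vorbis.WayInv (Vorbis.CodeOK u₀) [.rax, .rcx, .rdx] 4 Vorbis.L.__asan_load4_noabort.entry)
    (_h_vorbis_decode_packet_rest : ∀ (others : List Obj) (frames : List (Nat × FrameLayout)) (len : Nat) (Ar : Arena) (stored room : Int) (mode : Nat) (ysz : Nat → Nat), Calls Lay μ Vorbis.WayInv (Vorbis.conv u₀) Vorbis.L.vorbis_decode_packet_rest.entry (Vorbis.Spec.vorbis_decode_packet_rest.spec others frames len Ar stored room mode ysz)),
    ∀ (others : List Obj) (frames : List (Nat × FrameLayout)) (len : Nat) (A : Arena) (stored room : Int) (ysz : Nat → Nat), Calls Lay μ Vorbis.WayInv (Vorbis.conv u₀) Vorbis.L.vorbis_decode_packet.entry (Vorbis.Spec.vorbis_decode_packet.spec others frames len A stored room ysz)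

end Vorbis.Spec.vorbis_decode_packet
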